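-- pv_equiv track=rewrite | github.com/bbbii/algorithm-for-coding-test | program/level1/크기가 작은 부분문자열.py | solution
-- ===== SOURCE A (Python) =====
-- def solution(t, p):
--     x, answer = 0, 0
--     li = []
--     for i in range(len(t) - len(p) + 1):
--         ex = len(p) - 1
--         for j in range(len(p)):
--             x += int(t[i + j]) * (10**(ex - j))
--         li.append(x)
--         x = 0
--     for i in li:
--         if i <= int(p):
--             answer += 1
--     return answer
-- ===== SOURCE B (Python) =====
-- def solution(t, p):
--     n = len(p)
--     m = len(t)
--     if m < n:
--         return 0
--     pv = int(p)
--     v = 0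
--     for c in t[:n]:
--         v = v * 10 + int(c)
--     answer = 1 if v <= pv else 0
--     hi = 10 ** (n - 1)
--     for i in range(m - n):
--         v = (v - int(t[i]) * hi) * 10 + int(t[i + n])
--         if v <= pv:
--             answer += 1
--     return answer
-- ===== Notes on version B (the rewrite author's own statement) =====
-- stated objective: faster
-- what changed: A recomputes every window's numeric value digit by digit with a power loop and stores all values in a list before counting; B computes the first window's value once by Horner and then slides the window, updating the value in O(1) per shift and counting on the fly.
import Mathlib
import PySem

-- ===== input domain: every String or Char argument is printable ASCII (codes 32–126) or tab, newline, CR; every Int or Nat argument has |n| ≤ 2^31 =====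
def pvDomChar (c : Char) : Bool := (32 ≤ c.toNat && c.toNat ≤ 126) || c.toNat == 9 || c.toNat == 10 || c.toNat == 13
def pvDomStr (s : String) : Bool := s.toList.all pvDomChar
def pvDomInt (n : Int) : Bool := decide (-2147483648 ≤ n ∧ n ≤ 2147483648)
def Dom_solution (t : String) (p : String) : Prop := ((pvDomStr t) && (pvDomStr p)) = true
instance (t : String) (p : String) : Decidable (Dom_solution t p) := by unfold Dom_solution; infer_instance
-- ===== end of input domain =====

-- B replaces A's per-window digit-by-digit Horner loop and intermediate list by a single
-- sliding-window pass that updates the window's numeric value in O(1) per shift (objective: faster).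

-- ===== PORT A =====
-- int(c) for a 1-character string (both Pythons apply int to single characters);
-- `.getD 0` totalises: Pre_ guarantees the conversion succeeds wherever it is reached.
def pyDigitChar (c : Char) : Int := (PySem.Int.ofChars? [c]).getD 0

-- literal port of A: outer loop carries the Python state (x, li); `(ex - j).toNat` is exact
-- because 0 ≤ ex - j whenever the inner loop runs (j < len p).
def solution (t : String) (p : String) : Int :=
  let lt := t.toList
  let n := p.toList.length
  let st := (PySem.List.pyRange 0 ((lt.length : Int) - (n : Int) + 1) 1).foldl
    (fun (st : Int × List Int) i =>
      let ex : Int := (n : Int) - 1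
      let x := (PySem.List.pyRange 0 (n : Int) 1).foldl
        (fun x j => x + pyDigitChar (PySem.List.pyGetD lt (i + j) ' ') * 10 ^ ((ex - j).toNat)) st.1
      (0, st.2 ++ [x]))
    (0, ([] : List Int))
  st.2.foldl (fun ans v => if v ≤ (PySem.Int.ofStr? p).getD 0 then ans + 1 else ans) 0
-- ===== PORT B =====
-- literal port of Source B: Horner value of the first window, then one rolling update per slide.
def solution_alt (t : String) (p : String) : Int :=
  let lt := t.toList
  let n := p.toList.length
  let m := lt.length
  if m < n then 0
  else
    let pv := (PySem.Int.ofStr? p).getD 0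
    let v0 := (lt.take n).foldl (fun v c => v * 10 + pyDigitChar c) 0
    let a0 : Int := if v0 ≤ pv then 1 else 0
    let hi : Int := 10 ^ (n - 1)
    ((PySem.List.pyRange 0 ((m : Int) - (n : Int)) 1).foldl
      (fun (st : Int × Int) i =>
        let v := (st.1 - pyDigitChar (PySem.List.pyGetD lt i ' ') * hi) * 10
                  + pyDigitChar (PySem.List.pyGetD lt (i + (n : Int)) ' ')
        (v, if v ≤ pv then st.2 + 1 else st.2))
      (v0, a0)).2

-- ===== PRECONDITION & SPEC =====
-- Exactly the inputs on which the Python A returns: if len t < len p the loops never run and A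
-- returns 0 without touching a character; otherwise int(p) must parse (else ValueError) and every
-- character of t is fed to int(), so t must be all digits.
def Pre_solution (t : String) (p : String) : Prop :=
  t.toList.length < p.toList.length ∨
  ((PySem.Int.ofChars? p.toList).isSome = true ∧ t.toList.all PySem.Chars.isdigit = true)
instance (t : String) (p : String) : Decidable (Pre_solution t p) := by unfold Pre_solution; infer_instance
def pvWitness_solution : String × String := ("3456", "45")
def Spec_solution (t : String) (p : String) (out : Int) : Prop := out = solution_alt t p
instance (t : String) (p : String) (out : Int) : Decidable (Spec_solution t p out) := by unfold Spec_solution; infer_instance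

-- ===== CLAIM (what is proved, stated in full; the proofs are below) =====
def Claim_equal_solution : Prop := ∀ (t : String) (p : String), Dom_solution t p → Pre_solution t p → Spec_solution t p (solution t p)

-- ===== LEMMAS AND PROOFS =====

def pvPd (lt : List Char) (z : Int) : Int := pyDigitChar (PySem.List.pyGetD lt z ' ')
def pvWinSum (lt : List Char) (n : Nat) (i : Int) : Int :=
  ∑ k ∈ Finset.range n, pvPd lt (i + k) * 10 ^ (n - 1 - k)

theorem pv_sum_range (F : Nat → Int) (n : Nat) :
    ((List.range n).map F).sum = ∑ k ∈ Finset.range n, F k := by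
  rfl

theorem pv_innerA (lt : List Char) (n : Nat) (i x0 : Int) :
    (PySem.List.pyRange 0 (n : Int) 1).foldl
      (fun x j => x + pyDigitChar (PySem.List.pyGetD lt (i + j) ' ') * 10 ^ ((((n : Int) - 1) - j).toNat)) x0
    = x0 + pvWinSum lt n i := by
  rw [PySem.List.pyRange_zero_natCast, List.foldl_map, PySem.List.foldl_add, pv_sum_range]
  unfold pvWinSum
  congr 1
  apply Finset.sum_congr rfl
  intro k hk
  simp only [Finset.mem_range] at hk
  have h : (((n : Int) - 1) - (k : Int)).toNat = n - 1 - k := by omega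
  rw [h]
  rfl

theorem pv_outerA (lt : List Char) (n : Nat) (l : List Int) (acc : List Int) :
    l.foldl
      (fun (st : Int × List Int) i =>
        (0, st.2 ++ [(PySem.List.pyRange 0 (n : Int) 1).foldl
          (fun x j => x + pyDigitChar (PySem.List.pyGetD lt (i + j) ' ') * 10 ^ ((((n : Int) - 1) - j).toNat)) st.1]))
      (0, acc)
    = (0, acc ++ l.map (fun i => pvWinSum lt n i)) := by
  induction l generalizing acc with
  | nil => simp
  | cons a l ih =>
    simp only [List.foldl_cons, List.map_cons]
    rw [pv_innerA]
    rw [ih]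
    simp

theorem pv_countFold (pv : Int) (l : List Int) (a : Int) :
    l.foldl (fun ans v => if v ≤ pv then ans + 1 else ans) a
    = a + (l.countP (fun v => decide (v ≤ pv)) : Int) := by
  induction l generalizing a with
  | nil => simp
  | cons x l ih =>
    simp only [List.foldl_cons, List.countP_cons, ih]
    by_cases h : x ≤ pv <;> simp [h] <;> ring

theorem pv_horner (lt : List Char) (i : Int) (n : Nat) :
    (List.range n).foldl (fun (v : Int) (k : Nat) => v * 10 + pyDigitChar (PySem.List.pyGetD lt (i + (k : Int)) ' ')) 0 = pvWinSum lt n i := by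
  induction n with
  | zero => simp [pvWinSum]
  | succ s ih =>
    rw [List.range_succ, List.foldl_append, ih]
    simp only [List.foldl_cons, List.foldl_nil]
    unfold pvWinSum
    rw [Finset.sum_range_succ]
    rw [Finset.sum_mul]
    have : ∀ k ∈ Finset.range s, pvPd lt (i + k) * 10 ^ (s - 1 - k) * 10
        = pvPd lt (i + k) * 10 ^ (s - k) := by
      intro k hk
      simp only [Finset.mem_range] at hk
      rw [mul_assoc, ← pow_succ]
      congr 2
      omega
    rw [Finset.sum_congr rfl this]
    have h2 : ∀ k ∈ Finset.range s, pvPd lt (i + (k : Int)) * 10 ^ (s + 1 - 1 - k)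
        = pvPd lt (i + (k : Int)) * 10 ^ (s - k) := by
      intro k hk
      have h : s + 1 - 1 - k = s - k := by omega
      rw [h]
    rw [Finset.sum_congr rfl h2]
    simp [pvPd]

theorem pv_take_fold (lt : List Char) (n : Nat) (h : n ≤ lt.length) :
    (lt.take n).foldl (fun v c => v * 10 + pyDigitChar c) 0
    = (List.range n).foldl (fun (v : Int) (k : Nat) => v * 10 + pyDigitChar (PySem.List.pyGetD lt ((0 : Int) + (k : Int)) ' ')) 0 := by
  induction n with
  | zero => simp
  | succ s ih =>
    have hs : s < lt.length := by omega
    rw [List.take_succ, List.range_succ, List.foldl_append, List.foldl_append, ih (by omega)]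
    have hg : lt[s]? = some lt[s] := List.getElem?_eq_getElem hs
    rw [hg]
    simp only [Option.toList_some, List.foldl_cons, List.foldl_nil]
    rw [show ((0 : Int) + (s : Int)) = (s : Int) by ring,
        PySem.List.pyGetD_eq_getElem lt ' ' (by omega) (by push_cast; omega)]
    norm_num

theorem pv_roll (lt : List Char) (n : Nat) (h1 : 1 ≤ n) (i : Int) :
    (pvWinSum lt n i - pvPd lt i * 10 ^ (n - 1)) * 10 + pvPd lt (i + n)
    = pvWinSum lt n (i + 1) := by
  obtain ⟨s, rfl⟩ : ∃ s, n = s + 1 := ⟨n - 1, by omega⟩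
  unfold pvWinSum
  rw [Finset.sum_range_succ']
  rw [Finset.sum_range_succ (fun k => pvPd lt (i + 1 + k) * 10 ^ (s + 1 - 1 - k))]
  have e1 : ∀ k ∈ Finset.range s,
      pvPd lt (i + ((k : Nat) + 1 : Nat)) * 10 ^ (s + 1 - 1 - (k + 1))
      = pvPd lt (i + 1 + (k : Int)) * 10 ^ (s - 1 - k) := by
    intro k hk
    have h : i + ((k : Nat) + 1 : Nat) = i + 1 + (k : Int) := by push_cast; ring
    have h2 : s + 1 - 1 - (k + 1) = s - 1 - k := by omega
    rw [h, h2]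
  rw [Finset.sum_congr rfl e1]
  have hz : pvPd lt (i + ((0 : Nat) : Int)) * 10 ^ (s + 1 - 1 - 0) = pvPd lt i * 10 ^ (s + 1 - 1) := by
    norm_num
  rw [hz, add_sub_cancel_right, Finset.sum_mul]
  have e2 : ∀ k ∈ Finset.range s,
      pvPd lt (i + 1 + (k : Int)) * 10 ^ (s - 1 - k) * 10
      = pvPd lt (i + 1 + (k : Int)) * 10 ^ (s + 1 - 1 - k) := by
    intro k hk
    simp only [Finset.mem_range] at hk
    rw [mul_assoc, ← pow_succ]
    have h2 : s - 1 - k + 1 = s + 1 - 1 - k := by omega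
    rw [h2]
  rw [Finset.sum_congr rfl e2]
  have e3 : pvPd lt (i + ((s + 1 : Nat) : Int)) = pvPd lt (i + 1 + (s : Int)) * 10 ^ (s + 1 - 1 - s) := by
    have h : i + ((s + 1 : Nat) : Int) = i + 1 + (s : Int) := by push_cast; ring
    have h2 : s + 1 - 1 - s = 0 := by omega
    rw [h, h2, pow_zero, mul_one]
  rw [e3]

theorem pv_foldB (lt : List Char) (n : Nat) (pv : Int) (h1 : 1 ≤ n) (K : Nat) (cnt : Int) :
    (PySem.List.pyRange 0 (K : Int) 1).foldl
      (fun (st : Int × Int) i =>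
        let v := (st.1 - pyDigitChar (PySem.List.pyGetD lt i ' ') * 10 ^ (n - 1)) * 10
                  + pyDigitChar (PySem.List.pyGetD lt (i + (n : Int)) ' ')
        (v, if v ≤ pv then st.2 + 1 else st.2))
      (pvWinSum lt n 0, cnt)
    = (pvWinSum lt n (K : Int),
       cnt + ((List.range K).countP (fun (k : Nat) => decide (pvWinSum lt n ((k : Int) + 1) ≤ pv)) : Int)) := by
  induction K with
  | zero => simp [PySem.List.pyRange_one_eq_nil]
  | succ s ih =>
    have hc : ((s + 1 : Nat) : Int) = (s : Int) + 1 := by push_cast; ring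
    rw [hc, PySem.List.pyRange_one_succ_right (by positivity), List.foldl_append, ih]
    simp only [List.foldl_cons, List.foldl_nil]
    rw [show pyDigitChar (PySem.List.pyGetD lt ((s : Int)) ' ') = pvPd lt (s : Int) from rfl,
        show pyDigitChar (PySem.List.pyGetD lt ((s : Int) + (n : Int)) ' ') = pvPd lt ((s : Int) + (n : Int)) from rfl,
        pv_roll lt n h1 (s : Int)]
    rw [List.range_succ, List.countP_append]
    by_cases h : pvWinSum lt n ((s : Int) + 1) ≤ pv <;>
      simp [h] <;> push_cast <;> ring


theorem pv_countShift (K : Nat) (q : Nat → Bool) :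
    (List.range (K+1)).countP q = (if q 0 then 1 else 0) + (List.range K).countP (fun k => q (k+1)) := by
  rw [List.range_succ_eq_map, List.countP_cons, List.countP_map]
  by_cases h : q 0 = true
  · simp [h, Function.comp_def, Nat.add_comm]
  · simp [h, Function.comp_def]

theorem main_eq (t p : String)
    (hn : ¬ t.toList.length < p.toList.length → 1 ≤ p.toList.length) :
    solution t p = solution_alt t p := by
  unfold solution solution_alt
  dsimp only
  by_cases hmn : t.toList.length < p.toList.length
  · rw [if_pos hmn]
    rw [show PySem.List.pyRange 0 ((t.toList.length : Int) - (p.toList.length : Int) + 1) 1 = ([] : List Int)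
          from PySem.List.pyRange_one_eq_nil (by push_cast; omega)]
    simp
  · rw [if_neg hmn]
    have hn1 : 1 ≤ p.toList.length := hn hmn
    push_neg at hmn
    set lt := t.toList with hlt
    set n := p.toList.length with hnn
    set pv := (PySem.Int.ofStr? p).getD 0 with hpv
    set K := lt.length - n with hK
    have hM : (lt.length : Int) - (n : Int) + 1 = ((K + 1 : Nat) : Int) := by push_cast; omega
    rw [hM, pv_outerA, List.nil_append, pv_countFold, PySem.List.pyRange_zero_natCast,
        List.map_map, List.countP_map]
    rw [pv_take_fold lt n hmn, pv_horner lt 0 n]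
    have hM2 : (lt.length : Int) - (n : Int) = ((K : Nat) : Int) := by push_cast; omega
    rw [hM2, pv_foldB lt n pv hn1 K _]
    simp only [Function.comp_def]
    rw [pv_countShift K (fun k => decide (pvWinSum lt n (k : Int) ≤ pv))]
    have hq : (List.range K).countP (fun k => decide (pvWinSum lt n ((k + 1 : Nat) : Int) ≤ pv))
        = (List.range K).countP (fun (k : Nat) => decide (pvWinSum lt n ((k : Int) + 1) ≤ pv)) := by
      apply List.countP_congr
      intro k _
      have h : ((k + 1 : Nat) : Int) = (k : Int) + 1 := by push_cast; ring
      rw [h]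
    rw [hq]
    have h0 : pvWinSum lt n ((0 : Nat) : Int) = pvWinSum lt n 0 := by norm_num
    rw [h0]
    push_cast
    by_cases hw : pvWinSum lt n 0 ≤ pv
    · simp [hw]
    · simp [hw]

-- Pre_ forces p to be nonempty (int("") raises), which is all the equivalence proof needs of it
theorem pv_pre_len (p : String) (h : (PySem.Int.ofChars? p.toList).isSome = true) :
    1 ≤ p.toList.length := by
  cases hp : p.toList with
  | nil =>
    rw [hp] at h
    have hz : PySem.Int.ofChars? ([] : List Char) = none := by decide
    rw [hz] at h
    simp at h
  | cons c cs => simp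

-- ===== VERDICT (by name: the statement is the Claim_ definition above) =====
theorem solution_spec : Claim_equal_solution := by
  intro t p _ hpre
  unfold Spec_solution
  refine main_eq t p (fun hge => ?_)
  rcases hpre with h | ⟨hp, _⟩
  · exact absurd h hge
  · exact pv_pre_len p hp
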